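-- pv_equiv track=rewrite | github.com/nobleator/advent-of-code-2018 | d2.py | d2_1
-- ===== SOURCE A (Python) =====
-- def d2_1(data):
--     data = data.split("\n")
--     total_nums = {2: 0, 3: 0}
--     for row in data:
--         two_found = False
--         three_found = False
--         for char in row:
--             num = row.count(char)
--             if not two_found and num == 2:
--                 total_nums[2] += 1
--                 two_found -= True
--             if not three_found and num == 3:
--                 total_nums[3] += 1
--                 three_found = True
--     return total_nums[2] * total_nums[3]
-- ===== SOURCE B (Python) =====
-- def d2_1(data):
--     twos = 0
--     threes = 0
--     for row in data.split("\n"):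
--         counts = {}
--         for ch in row:
--             counts[ch] = counts.get(ch, 0) + 1
--         vals = counts.values()
--         if 2 in vals:
--             twos += 1
--         if 3 in vals:
--             threes += 1
--     return twos * threes
-- ===== Notes on version B (the rewrite author's own statement) =====
-- stated objective: faster
-- what changed: Per row, B builds a frequency dictionary in one pass and checks whether 2 or 3 is among its values, replacing A's per-character row.count inner scan and flag bookkeeping.
import Mathlib
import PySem

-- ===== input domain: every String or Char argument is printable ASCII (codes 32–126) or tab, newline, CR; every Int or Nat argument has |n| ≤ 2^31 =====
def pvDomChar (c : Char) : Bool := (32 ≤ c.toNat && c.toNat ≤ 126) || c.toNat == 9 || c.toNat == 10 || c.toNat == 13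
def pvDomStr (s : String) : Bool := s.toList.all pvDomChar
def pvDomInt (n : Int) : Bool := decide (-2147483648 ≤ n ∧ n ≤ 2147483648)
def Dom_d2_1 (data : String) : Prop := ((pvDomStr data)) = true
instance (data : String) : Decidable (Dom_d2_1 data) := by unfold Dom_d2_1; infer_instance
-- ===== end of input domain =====

-- B replaces A's per-character row.count inner scan (with its found-flags) by a one-pass
-- frequency dictionary per row whose values are then tested for 2 and 3.

-- ===== PORT A =====
-- inner loop state: (two_found as Int: False=0, then -1 after 'two_found -= True'; three_found : Bool; total_nums)
def d2_1_row (row : List Char) (s : Int × Bool × PySem.Dict Int Int) (ch : Char) :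
    Int × Bool × PySem.Dict Int Int :=
  let num : Int := PySem.List.count row ch
  let s := if s.1 == 0 && num == 2 then (s.1 - 1, s.2.1, (s.2.2).modify 2 0 (· + 1)) else s
  let s := if (!s.2.1) && num == 3 then (s.1, true, (s.2.2).modify 3 0 (· + 1)) else s
  s

def d2_1 (data : String) : Int :=
  let rows := (PySem.Str.split? data "\n").getD []
  let tn : PySem.Dict Int Int := ((PySem.Dict.empty).insert 2 0).insert 3 0
  let tn := rows.foldl (fun tn row =>
    (row.toList.foldl (d2_1_row row.toList) ((0 : Int), false, tn)).2.2) tn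
  tn.getD 2 0 * tn.getD 3 0

-- ===== PORT B =====
def d2_1_alt (data : String) : Int :=
  let rows := (PySem.Str.split? data "\n").getD []
  let p := rows.foldl (fun (p : Int × Int) row =>
    let counts := row.toList.foldl
      (fun (d : PySem.Dict Char Int) ch => d.insert ch (d.getD ch 0 + 1)) PySem.Dict.empty
    let vals := counts.values
    (if vals.contains 2 then p.1 + 1 else p.1,
     if vals.contains 3 then p.2 + 1 else p.2)) ((0 : Int), (0 : Int))
  p.1 * p.2

-- ===== PRECONDITION & SPEC =====
def Spec_d2_1 (data : String) (out : Int) : Prop := out = d2_1_alt data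
instance (data : String) (out : Int) : Decidable (Spec_d2_1 data out) := by unfold Spec_d2_1; infer_instance

-- ===== CLAIM (what is proved, stated in full; the proofs are below) =====
def Claim_equal_d2_1 : Prop := ∀ (data : String), Dom_d2_1 data → Spec_d2_1 data (d2_1 data)

-- ===== LEMMAS AND PROOFS =====

-- whether some char of row occurs with multiplicity k
def hasCount (row : List Char) (k : Int) : Bool :=
  row.any (fun c => ((PySem.List.count row c : Int) == k))

theorem inner_spec (row : List Char) (l : List Char) (tf : Int) (thf : Bool)
    (d : PySem.Dict Int Int) :
    (l.foldl (d2_1_row row) (tf, thf, d)).1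
      = (if tf = 0 ∧ l.any (fun c => ((PySem.List.count row c : Int) == 2)) then tf - 1 else tf)
    ∧ (l.foldl (d2_1_row row) (tf, thf, d)).2.1
      = (thf || l.any (fun c => ((PySem.List.count row c : Int) == 3)))
    ∧ (l.foldl (d2_1_row row) (tf, thf, d)).2.2.getD 2 0
      = d.getD 2 0 + (if tf = 0 ∧ l.any (fun c => ((PySem.List.count row c : Int) == 2)) then 1 else 0)
    ∧ (l.foldl (d2_1_row row) (tf, thf, d)).2.2.getD 3 0
      = d.getD 3 0 + (if thf = false ∧ l.any (fun c => ((PySem.List.count row c : Int) == 3)) then 1 else 0) := by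
  induction l generalizing tf thf d with
  | nil => simp
  | cons c l ih =>
    simp only [List.foldl_cons, List.any_cons, d2_1_row, PySem.List.count_eq]
    by_cases hc2 : ((List.count c row : Int)) = 2 <;>
      by_cases hc3 : ((List.count c row : Int)) = 3 <;>
      by_cases htf : tf = 0 <;> by_cases hthf : thf = true
    all_goals (try (exfalso; omega))
    all_goals refine ⟨?_, ?_, ?_, ?_⟩ <;>
      simp [ih, PySem.Dict.getD_modify, PySem.List.count_eq, htf, hthf, hc2, hc3]

theorem contains_vals (row : List Char) (k : Int) :
    ((row.foldl (fun (d : PySem.Dict Char Int) ch => d.insert ch (d.getD ch 0 + 1))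
        PySem.Dict.empty).values).contains k = hasCount row k := by
  rw [PySem.Dict.foldl_insert_getD_add_one_eq_counter, Bool.eq_iff_iff]
  simp [hasCount, PySem.Dict.values, PySem.Dict.items_counter, PySem.Set.mem_ofList,
    List.any_eq_true, PySem.List.count_eq]

theorem outer_spec (rows : List String) (d : PySem.Dict Int Int) (p : Int × Int)
    (h2 : d.getD 2 0 = p.1) (h3 : d.getD 3 0 = p.2) :
    (rows.foldl (fun tn row =>
        (row.toList.foldl (d2_1_row row.toList) ((0 : Int), false, tn)).2.2) d).getD 2 0
      = (rows.foldl (fun (p : Int × Int) row =>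
          let counts := row.toList.foldl
            (fun (d : PySem.Dict Char Int) ch => d.insert ch (d.getD ch 0 + 1)) PySem.Dict.empty
          let vals := counts.values
          (if vals.contains 2 then p.1 + 1 else p.1,
           if vals.contains 3 then p.2 + 1 else p.2)) p).1
    ∧ (rows.foldl (fun tn row =>
        (row.toList.foldl (d2_1_row row.toList) ((0 : Int), false, tn)).2.2) d).getD 3 0
      = (rows.foldl (fun (p : Int × Int) row =>
          let counts := row.toList.foldl
            (fun (d : PySem.Dict Char Int) ch => d.insert ch (d.getD ch 0 + 1)) PySem.Dict.empty
          let vals := counts.values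
          (if vals.contains 2 then p.1 + 1 else p.1,
           if vals.contains 3 then p.2 + 1 else p.2)) p).2 := by
  induction rows generalizing d p with
  | nil => exact ⟨h2, h3⟩
  | cons row rest ih =>
    simp only [List.foldl_cons]
    apply ih
    · obtain ⟨-, -, hg2, -⟩ := inner_spec row.toList row.toList 0 false d
      rw [hg2, h2]; simp only [contains_vals]
      cases hA : hasCount row.toList 2 <;>
        simp [hasCount, PySem.List.count_eq] at hA <;>
        simp [hA, PySem.List.count_eq] <;> (try exact hA)
    · obtain ⟨-, -, -, hg3⟩ := inner_spec row.toList row.toList 0 false d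
      rw [hg3, h3]; simp only [contains_vals]
      cases hA : hasCount row.toList 3 <;>
        simp [hasCount, PySem.List.count_eq] at hA <;>
        simp [hA, PySem.List.count_eq] <;> (try exact hA)

-- ===== VERDICT (by name: the statement is the Claim_ definition above) =====
theorem d2_1_spec : Claim_equal_d2_1 := by
  intro data _
  unfold Spec_d2_1 d2_1 d2_1_alt
  obtain ⟨h2, h3⟩ := outer_spec ((PySem.Str.split? data "\n").getD [])
    (((PySem.Dict.empty).insert 2 0).insert 3 0) ((0 : Int), (0 : Int)) (by decide) (by decide)
  simp only at h2 h3 ⊢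
  rw [h2, h3]
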